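-- pv_equiv track=rewrite | github.com/executablebooks/mdformat | src/mdformat/_cli.py | get_plugin_info_str
-- ===== SOURCE A (Python) =====
-- from collections.abc import Generator, Iterable, Mapping, Sequence
--
-- def get_plugin_info_str(
--     parser_extension_dists: Mapping[str, tuple[str, list[str]]],
--     codeformatter_dists: Mapping[str, tuple[str, list[str]]],
-- ) -> str:
--     info = ""
--     if codeformatter_dists:
--         info += "installed codeformatters:"
--         for dist, dist_info in codeformatter_dists.items():
--             langs = ", ".join(dist_info[1])
--             info += f"\n  {dist}: {langs}"
--     if parser_extension_dists:
--         if info: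
--             info += "\n\n"
--         info += "installed extensions:"
--         for dist, dist_info in parser_extension_dists.items():
--             extensions = ", ".join(dist_info[1])
--             info += f"\n  {dist}: {extensions}"
--     return info
-- ===== SOURCE B (Python) =====
-- _HEADERS = ("installed codeformatters:", "installed extensions:")
--
--
-- def get_plugin_info_str(parser_extension_dists, codeformatter_dists):
--     # Merge both mappings into one tagged stream (codeformatters first), then do a
--     # single groupby-style pass: emit a header whenever the tag changes, with a
--     # blank-line separator before every group but the first.
--     tagged = [(0, d, i) for d, i in codeformatter_dists.items()]
--     tagged += [(1, d, i) for d, i in parser_extension_dists.items()]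
--     out = []
--     prev = None
--     for kind, dist, info in tagged:
--         if kind != prev:
--             if prev is not None:
--                 out.append("\n\n")
--             out.append(_HEADERS[kind])
--             prev = kind
--         out.append(f"\n  {dist}: {', '.join(info[1])}")
--     return "".join(out)
-- ===== Notes on version B (the rewrite author's own statement) =====
-- stated objective: alternative
-- what changed: Replaces A's two conditional blocks with a stateful separator branch by merging both mappings into one tagged stream and doing a single groupby-style pass that emits each header on tag change and a separator before every group but the first.
import Mathlib
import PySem

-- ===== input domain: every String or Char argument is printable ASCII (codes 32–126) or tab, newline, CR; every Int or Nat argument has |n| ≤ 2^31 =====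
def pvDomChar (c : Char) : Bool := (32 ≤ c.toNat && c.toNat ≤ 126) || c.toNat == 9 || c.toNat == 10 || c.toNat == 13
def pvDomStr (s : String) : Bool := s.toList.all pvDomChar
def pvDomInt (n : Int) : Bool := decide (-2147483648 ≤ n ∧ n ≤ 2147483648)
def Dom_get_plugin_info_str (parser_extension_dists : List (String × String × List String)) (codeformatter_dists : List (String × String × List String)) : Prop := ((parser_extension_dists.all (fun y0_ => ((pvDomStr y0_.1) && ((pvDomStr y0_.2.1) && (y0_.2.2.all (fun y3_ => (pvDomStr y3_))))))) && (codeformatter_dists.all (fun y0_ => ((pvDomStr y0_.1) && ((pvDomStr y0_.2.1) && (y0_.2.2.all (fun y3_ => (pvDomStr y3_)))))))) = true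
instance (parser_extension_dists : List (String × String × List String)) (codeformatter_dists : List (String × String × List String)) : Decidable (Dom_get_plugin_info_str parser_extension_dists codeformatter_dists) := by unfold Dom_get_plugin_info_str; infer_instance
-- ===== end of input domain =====

-- B replaces A's two conditional blocks and midstream separator branch by a single
-- groupby-style pass over one tagged stream of entries (objective: alternative, same cost).

-- ===== PORT A =====
-- one "\n  {dist}: {langs}" line (shape of both f-strings in A)
def pvLine (x : String × String × List String) : String :=
  "\n  " ++ x.1 ++ ": " ++ PySem.Str.join ", " x.2.2

def get_plugin_info_str (parser_extension_dists : List (String × String × List String)) (codeformatter_dists : List (String × String × List String)) : String :=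
  let info : String := ""
  let cItems := (PySem.Dict.ofList codeformatter_dists).items
  let info := if cItems ≠ [] then
      cItems.foldl (fun acc x => acc ++ pvLine x) (info ++ "installed codeformatters:")
    else info
  let pItems := (PySem.Dict.ofList parser_extension_dists).items
  let info := if pItems ≠ [] then
      pItems.foldl (fun acc x => acc ++ pvLine x)
        ((if info ≠ "" then info ++ "\n\n" else info) ++ "installed extensions:")
    else info
  info

-- ===== PORT B =====
-- _HEADERS[kind] from Source B (kind is only ever 0 or 1)
def pvHeader (k : Int) : String :=
  if k == 0 then "installed codeformatters:" else "installed extensions:"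

-- the f-string line of Source B's loop
def pvLineB (x : String × String × List String) : String :=
  "\n  " ++ x.1 ++ ": " ++ PySem.Str.join ", " x.2.2

-- one iteration of Source B's loop over the tagged stream: state = (out, prev)
def pvStep (st : List String × Option Int) (kx : Int × String × String × List String) :
    List String × Option Int :=
  let st := if st.2 ≠ some kx.1 then
      ((st.1 ++ (if st.2.isSome then ["\n\n"] else [])) ++ [pvHeader kx.1], some kx.1)
    else st
  (st.1 ++ [pvLineB kx.2], st.2)

def get_plugin_info_str_alt (parser_extension_dists : List (String × String × List String)) (codeformatter_dists : List (String × String × List String)) : String :=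
  let tagged :=
    ((PySem.Dict.ofList codeformatter_dists).items.map (fun x => ((0 : Int), x)))
      ++ ((PySem.Dict.ofList parser_extension_dists).items.map (fun x => ((1 : Int), x)))
  PySem.Str.join "" (tagged.foldl pvStep ([], none)).1

-- ===== PRECONDITION & SPEC =====
def Spec_get_plugin_info_str (parser_extension_dists : List (String × String × List String)) (codeformatter_dists : List (String × String × List String)) (out : String) : Prop := out = get_plugin_info_str_alt parser_extension_dists codeformatter_dists
instance (parser_extension_dists : List (String × String × List String)) (codeformatter_dists : List (String × String × List String)) (out : String) : Decidable (Spec_get_plugin_info_str parser_extension_dists codeformatter_dists out) := by unfold Spec_get_plugin_info_str; infer_instance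

-- ===== CLAIM =====
def Claim_equal_get_plugin_info_str : Prop := ∀ (parser_extension_dists : List (String × String × List String)) (codeformatter_dists : List (String × String × List String)), Dom_get_plugin_info_str parser_extension_dists codeformatter_dists → Spec_get_plugin_info_str parser_extension_dists codeformatter_dists (get_plugin_info_str parser_extension_dists codeformatter_dists)

-- ===== LEMMAS AND PROOFS =====

theorem pv_str_ext {s t : String} (h : s.toList = t.toList) : s = t := by
  have := congrArg String.ofList h
  simpa using this

theorem pv_join_nil (sep : String) : PySem.Str.join sep [] = "" := by
  apply pv_str_ext
  simp [PySem.Str.toList_join, PySem.Chars.join_nil]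

theorem pv_join_empty_cons (a : String) (l : List String) :
    PySem.Str.join "" (a :: l) = a ++ PySem.Str.join "" l := by
  apply pv_str_ext
  cases l with
  | nil => simp [PySem.Str.toList_join, PySem.Chars.join_singleton, PySem.Chars.join_nil]
  | cons b t => simp [PySem.Str.toList_join, PySem.Chars.join_cons_cons]

theorem pv_join_empty_append (l₁ l₂ : List String) :
    PySem.Str.join "" (l₁ ++ l₂) = PySem.Str.join "" l₁ ++ PySem.Str.join "" l₂ := by
  induction l₁ with
  | nil => simp [pv_join_nil]
  | cons a t ih => simp [pv_join_empty_cons, ih, String.append_assoc]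

-- A's loops: string-fold of the lines = join of the mapped lines
theorem pv_foldl_line (l : List (String × String × List String)) (s : String) :
    l.foldl (fun acc x => acc ++ pvLine x) s
      = s ++ PySem.Str.join "" (l.map pvLine) := by
  induction l generalizing s with
  | nil => simp [pv_join_nil]
  | cons a t ih =>
    simp only [List.foldl_cons, List.map_cons, ih, pv_join_empty_cons]
    rw [String.append_assoc]

theorem pv_header_ne (h X : String) (hh : h ≠ "") : h ++ X ≠ "" := by
  intro he
  have := congrArg String.toList he
  simp at this
  exact hh this.1

-- B's loop on a same-kind run when the previous tag already equals k: only lines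
theorem pv_fold_same (k : Int) (l : List (String × String × List String)) (out : List String) :
    (l.map (fun x => (k, x))).foldl pvStep (out, some k) = (out ++ l.map pvLineB, some k) := by
  induction l generalizing out with
  | nil => simp
  | cons a t ih =>
    simp only [List.map_cons, List.foldl_cons, pvStep, ne_eq, not_true_eq_false, if_neg,
      not_false_eq_true, ih]
    simp

-- B's loop on a nonempty same-kind run entered with a different previous tag:
-- separator (unless first group) + header + lines
theorem pv_fold_group (k : Int) (x : String × String × List String)
    (t : List (String × String × List String)) (out : List String) (prev : Option Int)
    (h : prev ≠ some k) :
    ((x :: t).map (fun y => (k, y))).foldl pvStep (out, prev)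
      = ((out ++ (if prev.isSome then ["\n\n"] else []) ++ [pvHeader k]) ++ (x :: t).map pvLineB,
          some k) := by
  simp only [List.map_cons, List.foldl_cons, pvStep, ne_eq, h, not_false_eq_true, if_pos,
    pv_fold_same]
  simp [List.append_assoc]

theorem pv_lineB_eq : pvLineB = pvLine := rfl

-- ===== VERDICT =====
theorem get_plugin_info_str_spec : Claim_equal_get_plugin_info_str := by
  intro p c _
  show _ = _
  unfold get_plugin_info_str get_plugin_info_str_alt
  simp only [List.foldl_append]
  by_cases hc : (PySem.Dict.ofList c).items = []
  · by_cases hp : (PySem.Dict.ofList p).items = []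
    · simp [hc, hp, pv_join_nil]
    · obtain ⟨a, t, h1⟩ := List.exists_cons_of_ne_nil hp
      rw [hc, h1]
      simp only [List.map_nil, List.foldl_nil]
      rw [pv_fold_group 1 a t [] none (by simp)]
      simp [pv_foldl_line, pv_join_empty_cons, pvHeader, pv_lineB_eq, String.append_assoc]
  · obtain ⟨a, t, h1⟩ := List.exists_cons_of_ne_nil hc
    rw [h1]
    rw [pv_fold_group 0 a t [] none (by simp)]
    by_cases hp : (PySem.Dict.ofList p).items = []
    · rw [hp]
      simp only [List.map_nil, List.foldl_nil]
      simp [pv_foldl_line, pv_join_empty_cons, pvHeader, pv_lineB_eq, String.append_assoc]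
    · obtain ⟨b, u, h2⟩ := List.exists_cons_of_ne_nil hp
      rw [h2]
      rw [pv_fold_group 1 b u _ (some 0) (by simp)]
      simp only [ne_eq, reduceCtorEq, not_false_eq_true, reduceIte, pv_foldl_line]
      have hne : ("" ++ "installed codeformatters:") ++ PySem.Str.join ""
          ((a :: t).map pvLine) ≠ "" := pv_header_ne _ _ (by decide)
      rw [if_pos hne]
      simp [pv_join_empty_append, pv_join_empty_cons, pvHeader, pv_lineB_eq,
        String.append_assoc]
      rw [show ("\n\ninstalled extensions:" : String) = "\n\n" ++ "installed extensions:" from rfl,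
        String.append_assoc]
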